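-- pv_equiv track=rewrite | github.com/Li-WY/BPS-data-analysis | Analysis pipeline using Nanopore reads/scripts/puritysam2tsv.py | cs_parser
-- ===== SOURCE A (Python) =====
-- def cs_parser(string):
--     # state switching parser, so start in None state
--     state = None
--     counter = 0
--     assemble_number = ''
--     stats = { 'bases': {'=': 0,':': 0,'*': 0,'+': 0,'-': 0,'~': 0 } ,
--             'states': {'=': 0,':': 0,'*': 0,'+': 0,'-': 0,'~': 0 } }
--     # just initialized stuff to hold things, then start going through string
--     for i in string:
--         if i in ['=',':','*','+','-','~']:
--             # then it's a mode change
--             if state is not None: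
--                 # check that we're not at the very start, ie we have a populated
--                 # counter or assemble_number
--                 if state == '*':
--                     # if it was previously a * then it should be two bases
--                     # showing change, but is only ever one mismatch
--                     stats['bases'][state] += 1
--                 if state in [':','~']:
--                     # if it was previously one of these, then we should have
--                     # an assemble_number populated up there, we should be
--                     # able to interpret that as a counter and reset
--                     counter = int(assemble_number)
--                     assemble_number = ''
--                 else:
--                     # increment by the counter and reset
--                     stats['bases'][state] += counter
--                     counter = 0
--             # switch states
--             state = i
--             # and record starting a state
--             stats['states'][state] += 1
--         else:
--             if state == '*':
--                 # if so, then skip because it's only ever two letters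
--                 next
--             elif state in [':','~'] :
--                 try:
--                     # if here, then try and see if it's numeric (int)
--                     assemble_number += str(int(i))
--                 except:
--                     # else its a base, so keep going
--                     next
--             else:
--                 # otherwise then just increment it along
--                 counter += 1
--     # at end, add on counter to the started state
--     stats['bases'][state] += counter
--     return(stats)
-- ===== SOURCE B (Python) =====
-- OPS = '=:*+-~'
--
-- def cs_parser(string):
--     # Phase 1: tokenize right-to-left into (op, payload) tokens plus a leading prefix.
--     pay = []
--     toks = []
--     for c in reversed(string):
--         if c in OPS:
--             toks.append((c, pay[::-1]))
--             pay = []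
--         else:
--             pay.append(c)
--     toks.reverse()
--     carry = len(pay)  # chars before the first operator leak into the first count
--
--     # Phase 2: states are plain occurrence counts of the operator characters.
--     states = {op: sum(1 for t in toks if t[0] == op) for op in OPS}
--
--     # Phase 3: bases via a single carry integer threaded through the tokens.
--     bases = {op: 0 for op in OPS}
--     for op, payload in toks[:-1]:
--         if op in ':~':
--             carry = int(''.join(c for c in payload if c.isdigit()))
--         elif op == '*':
--             bases['*'] += carry + 1
--             carry = 0
--         else:
--             bases[op] += carry + len(payload)
--             carry = 0
--     op, payload = toks[-1]  # no operator at all: IndexError here (A raises KeyError there)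
--     if op in ':~' or op == '*':
--         bases[op] += carry
--     else:
--         bases[op] += carry + len(payload)
--     return {'bases': bases, 'states': states}
-- ===== Notes on version B (the rewrite author's own statement) =====
-- stated objective: alternative
-- what changed: A is a char-by-char state machine with mode-change flushes and an assemble_number string; B tokenizes the string into a leading prefix plus (operator, payload) tokens, computes the states dict as plain occurrence counts, and computes the bases dict by threading one carry integer over the tokens (digits of a ':'/'~' payload converted at once, no per-char state).
import Mathlib
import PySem

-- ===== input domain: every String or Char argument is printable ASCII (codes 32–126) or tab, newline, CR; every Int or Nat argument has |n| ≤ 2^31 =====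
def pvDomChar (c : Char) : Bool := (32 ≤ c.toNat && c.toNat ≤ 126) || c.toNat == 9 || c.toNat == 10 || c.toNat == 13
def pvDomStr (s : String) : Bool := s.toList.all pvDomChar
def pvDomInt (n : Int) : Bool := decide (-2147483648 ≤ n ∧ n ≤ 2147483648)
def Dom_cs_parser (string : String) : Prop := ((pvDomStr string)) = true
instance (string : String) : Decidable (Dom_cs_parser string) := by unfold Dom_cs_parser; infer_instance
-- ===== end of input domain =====

-- B replaces A's char-by-char state machine by a tokenizer plus per-operator occurrence
-- counts and a single carry integer threaded over the tokens; objective: alternative.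

-- ===== PORT A =====
def csOpsA : List Char := ['=', ':', '*', '+', '-', '~']

def csA_init : PySem.Dict String Int :=
  PySem.Dict.ofList [("=", 0), (":", 0), ("*", 0), ("+", 0), ("-", 0), ("~", 0)]

-- A's loop state: (state, counter, assemble_number, stats['bases'], stats['states'])
structure CsSt where
  st : Option Char
  ctr : Int
  asm : List Char
  bases : PySem.Dict String Int
  states : PySem.Dict String Int
deriving Repr, DecidableEq

-- one iteration of A's `for i in string` loop.
-- `counter = int(assemble_number)` is ported as `.getD 0`: the ValueError on an empty
-- assemble_number is excluded by Pre_cs_parser.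
def csA_step (s : CsSt) (i : Char) : CsSt :=
  if i ∈ csOpsA then
    let s1 :=
      match s.st with
      | none => s
      | some prev =>
        let sa := if prev = '*' then { s with bases := s.bases.modify (String.ofList [prev]) 0 (· + 1) } else s
        if prev = ':' ∨ prev = '~' then
          { sa with ctr := (PySem.Int.ofChars? sa.asm).getD 0, asm := [] }
        else
          { sa with bases := sa.bases.modify (String.ofList [prev]) 0 (· + sa.ctr), ctr := 0 }
    { s1 with st := some i, states := s1.states.modify (String.ofList [i]) 0 (· + 1) }
  else
    if s.st = some '*' then s
    else if s.st = some ':' ∨ s.st = some '~' then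
      -- try: assemble_number += str(int(i)) / except: pass
      match PySem.Int.ofChars? [i] with
      | some n => { s with asm := s.asm ++ PySem.Int.toChars n }
      | none => s
    else { s with ctr := s.ctr + 1 }

-- final `stats['bases'][state] += counter`: the KeyError on state = None (no operator in
-- the string) is excluded by Pre_cs_parser; the port leaves bases unchanged there.
def cs_parser (string : String) : List (String × List (String × Int)) :=
  let fin := string.toList.foldl csA_step ⟨none, 0, [], csA_init, csA_init⟩
  let bases :=
    match fin.st with
    | some c => fin.bases.modify (String.ofList [c]) 0 (· + fin.ctr)
    | none => fin.bases
  [("bases", bases.items), ("states", fin.states.items)]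

-- ===== PORT B =====
def csOpsB : List Char := ['=', ':', '*', '+', '-', '~']   -- Source B's OPS = '=:*+-~'

-- phase 1: `for c in reversed(string)`, collecting (op, payload) tokens
def csB_tokStep (acc : List Char × List (Char × List Char)) (c : Char) :
    List Char × List (Char × List Char) :=
  if c ∈ csOpsB then ([], acc.2 ++ [(c, acc.1.reverse)]) else (acc.1 ++ [c], acc.2)

-- phase 3 loop body, over toks[:-1].  `int(''.join(digits))` is ported as `.getD 0`:
-- the ValueError on a digitless ':'/'~' payload is excluded by Pre_cs_parser.
def csB_nonlast (acc : Int × PySem.Dict String Int) (t : Char × List Char) :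
    Int × PySem.Dict String Int :=
  if t.1 = ':' ∨ t.1 = '~' then
    ((PySem.Int.ofChars? (t.2.filter PySem.Chars.isdigit)).getD 0, acc.2)
  else if t.1 = '*' then
    (0, acc.2.modify "*" 0 (· + acc.1 + 1))
  else
    (0, acc.2.modify (String.ofList [t.1]) 0 (· + acc.1 + (t.2.length : Int)))

-- the final `op, payload = toks[-1]; if … else …` block of Source B
def csB_last (acc : Int × PySem.Dict String Int) (t : Char × List Char) :
    PySem.Dict String Int :=
  if t.1 = ':' ∨ t.1 = '~' ∨ t.1 = '*' then
    acc.2.modify (String.ofList [t.1]) 0 (· + acc.1)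
  else
    acc.2.modify (String.ofList [t.1]) 0 (· + acc.1 + (t.2.length : Int))

def cs_parser_alt (string : String) : List (String × List (String × Int)) :=
  let lt := string.toList.reverse.foldl csB_tokStep ([], [])
  let toks := lt.2.reverse
  let carry0 : Int := lt.1.length
  -- states = {op: sum(1 for t in toks if t[0] == op) for op in OPS}
  let states := PySem.Dict.ofList (csOpsB.map fun op =>
    (String.ofList [op], ((toks.countP fun t => t.1 == op) : Int)))
  let bases0 := PySem.Dict.ofList (csOpsB.map fun op => (String.ofList [op], (0 : Int)))
  let fin := toks.dropLast.foldl csB_nonlast (carry0, bases0)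
  -- toks[-1]: the IndexError on a string with no operator is excluded by Pre_cs_parser;
  -- the port leaves bases unchanged there.
  let bases :=
    match toks.getLast? with
    | some t => csB_last fin t
    | none => fin.2
  [("bases", bases.items), ("states", states.items)]

-- ===== PRECONDITION & SPEC =====
-- Pre_ excludes exactly the inputs on which Python A raises: strings with no operator
-- character (KeyError on stats['bases'][None]) and strings in which a ':' or '~' operator
-- is followed by a further operator with no digit in between (ValueError on int('')).
def Pre_cs_parser (string : String) : Prop :=
  (∃ p < string.toList.length, string.toList.getD p ' ' ∈ csOpsA) ∧
  ∀ p < string.toList.length, ∀ q < string.toList.length, p < q →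
    (string.toList.getD p ' ' = ':' ∨ string.toList.getD p ' ' = '~') →
    string.toList.getD q ' ' ∈ csOpsA →
    (∀ r < q, p < r → string.toList.getD r ' ' ∉ csOpsA) →
    ∃ r < q, p < r ∧ (string.toList.getD r ' ').isDigit = true
instance (string : String) : Decidable (Pre_cs_parser string) := by
  unfold Pre_cs_parser
  exact @instDecidableAnd _ _ inferInstance
    (@Nat.decidableBallLT _ _ (fun _ _ => @Nat.decidableBallLT _ _ (fun _ _ => inferInstance)))

def pvWitness_cs_parser : String := ":3=a"

def Spec_cs_parser (string : String) (out : List (String × List (String × Int))) : Prop := out = cs_parser_alt string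
instance (string : String) (out : List (String × List (String × Int))) : Decidable (Spec_cs_parser string out) := by unfold Spec_cs_parser; infer_instance

-- ===== CLAIM (what is proved, stated in full; the proofs are below) =====
def Claim_equal_cs_parser : Prop := ∀ (string : String), Dom_cs_parser string → Pre_cs_parser string → Spec_cs_parser string (cs_parser string)

-- ===== LEMMAS AND PROOFS =====

-- recursive specification of the tokenizer: (leading prefix, [(op, payload), …])
def csToks : List Char → List Char × List (Char × List Char)
  | [] => ([], [])
  | c :: r =>
    let p := csToks r
    if c ∈ csOpsA then ([], (c, p.1) :: p.2) else (c :: p.1, p.2)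

-- what one token's payload does to A's state (digits already filtered)
def csPay (s : CsSt) (l : List Char) : CsSt :=
  if s.st = some ':' ∨ s.st = some '~' then { s with asm := s.asm ++ l.filter PySem.Chars.isdigit }
  else if s.st = some '*' then s
  else { s with ctr := s.ctr + (l.length : Int) }

-- A's loop at token granularity
def csTok (s : CsSt) (t : Char × List Char) : CsSt := csPay (csA_step s t.1) t.2

-- A's final bases adjustment
def csFin (s : CsSt) : PySem.Dict String Int :=
  match s.st with
  | some c => s.bases.modify (String.ofList [c]) 0 (· + s.ctr)
  | none => s.bases

-- the 6-key stats dict with symbolic values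
def csMkD (v1 v2 v3 v4 v5 v6 : Int) : PySem.Dict String Int :=
  PySem.Dict.ofList [("=", v1), (":", v2), ("*", v3), ("+", v4), ("-", v5), ("~", v6)]

def csBump (d : PySem.Dict String Int) (t : Char × List Char) : PySem.Dict String Int :=
  d.modify (String.ofList [t.1]) 0 (· + 1)

-- B's phase-3 run, recursively: current token flushed as non-last, last token closed
def csBRun (cb : Int × PySem.Dict String Int) (t : Char × List Char) :
    List (Char × List Char) → PySem.Dict String Int
  | [] => csB_last cb t
  | u :: ts => csBRun (csB_nonlast cb t) u ts

theorem csOpsB_eq : csOpsB = csOpsA := rfl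

theorem csPay_nil (s : CsSt) : csPay s [] = s := by
  cases s; unfold csPay; split_ifs <;> simp

theorem tok_eq (cs : List Char) :
    cs.reverse.foldl csB_tokStep ([], []) = ((csToks cs).1.reverse, (csToks cs).2.reverse) := by
  induction cs with
  | nil => rfl
  | cons c r ih =>
    by_cases hc : c ∈ csOpsA <;>
      simp [List.reverse_cons, List.foldl_append, ih, csB_tokStep, csToks, csOpsB_eq, hc]

theorem csToks_ops (cs : List Char) : ∀ t ∈ (csToks cs).2, t.1 ∈ csOpsA := by
  induction cs with
  | nil => intro t ht; simp [csToks] at ht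
  | cons c r ih =>
    intro t ht
    by_cases hc : c ∈ csOpsA
    · simp only [csToks, if_pos hc] at ht
      rcases List.mem_cons.mp ht with h | h
      · rw [h]; exact hc
      · exact ih t h
    · simp only [csToks, if_neg hc] at ht
      exact ih t ht

theorem csToks_ne_nil (cs : List Char) (c : Char) (hc : c ∈ cs) (hop : c ∈ csOpsA) :
    (csToks cs).2 ≠ [] := by
  induction cs with
  | nil => cases hc
  | cons a r ih =>
    by_cases ha : a ∈ csOpsA
    · simp [csToks, ha]
    · rcases List.mem_cons.mp hc with h | h
      · exact absurd hop (h ▸ ha)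
      · simpa [csToks, ha] using ih h

-- int(c) on a single domain character succeeds exactly on '0'..'9'
theorem dom_isSome (c : Char) (h : pvDomChar c = true) :
    (PySem.Int.ofChars? [c]).isSome = PySem.Chars.isdigit c := by
  have h127 : c.toNat < 127 := by
    simp only [pvDomChar, Bool.or_eq_true, Bool.and_eq_true, decide_eq_true_eq, beq_iff_eq] at h
    omega
  have key : ∀ v : Nat, v < 127 →
      (PySem.Int.ofChars? [Char.ofNat v]).isSome = PySem.Chars.isdigit (Char.ofNat v) := by decide
  have := key c.toNat h127
  rwa [Char.ofNat_toNat] at this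

theorem dom_toChars (c : Char) (h : pvDomChar c = true) :
    (PySem.Int.ofChars? [c]).elim ([] : List Char) PySem.Int.toChars =
      if PySem.Chars.isdigit c then [c] else [] := by
  have h127 : c.toNat < 127 := by
    simp only [pvDomChar, Bool.or_eq_true, Bool.and_eq_true, decide_eq_true_eq, beq_iff_eq] at h
    omega
  have key : ∀ v : Nat, v < 127 →
      (PySem.Int.ofChars? [Char.ofNat v]).elim ([] : List Char) PySem.Int.toChars =
        if PySem.Chars.isdigit (Char.ofNat v) then [Char.ofNat v] else [] := by decide
  have := key c.toNat h127
  rwa [Char.ofNat_toNat] at this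

theorem payload_char (s : CsSt) (l : List Char) (c : Char)
    (hd : pvDomChar c = true) (hop : c ∉ csOpsA) :
    csPay (csA_step s c) l = csPay s (c :: l) := by
  rw [csA_step, if_neg hop]
  rcases s with ⟨st, ctr, asm, b, t⟩
  by_cases h1 : st = some '*'
  · simp [csPay, h1]
  · by_cases h2 : st = some ':' ∨ st = some '~'
    · rcases hoc : PySem.Int.ofChars? [c] with _ | n
      · have hdig : PySem.Chars.isdigit c = false := by
          have := dom_isSome c hd; rw [hoc] at this; simpa using this.symm
        simp [h1, h2, csPay, hdig]
      · have hdig : PySem.Chars.isdigit c = true := by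
          have := dom_isSome c hd; rw [hoc] at this; simpa using this.symm
        have htc : PySem.Int.toChars n = [c] := by
          have := dom_toChars c hd; rw [hoc, hdig] at this; simpa using this
        simp [h1, h2, csPay, hdig, htc]
    · simp [csPay, h1, h2]
      omega

theorem main_fold (cs : List Char) :
    ∀ s : CsSt, (∀ c ∈ cs, pvDomChar c = true) →
      cs.foldl csA_step s = (csToks cs).2.foldl csTok (csPay s (csToks cs).1) := by
  induction cs with
  | nil => intro s _; simp [csToks, csPay_nil]
  | cons c r ih =>
    intro s h
    have hc := h c (by simp)
    have hr : ∀ c' ∈ r, pvDomChar c' = true := fun c' hc' => h c' (by simp [hc'])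
    by_cases hop : c ∈ csOpsA
    · simp only [List.foldl_cons, csToks, hop, if_pos]
      rw [ih (csA_step s c) hr]
      simp only [csPay_nil, csTok]
    · simp only [List.foldl_cons, csToks, hop, if_false]
      rw [ih (csA_step s c) hr, payload_char s (csToks r).1 c hc hop]

theorem start_step (i : Char) (c : Int) (a : List Char) (b d : PySem.Dict String Int)
    (h : i ∈ csOpsA) :
    csA_step ⟨none, c, a, b, d⟩ i = ⟨some i, c, a, b, d.modify (String.ofList [i]) 0 (· + 1)⟩ := by
  rw [csA_step, if_pos h]

theorem pre0 (P : List Char) :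
    csPay ⟨none, 0, [], csA_init, csA_init⟩ P =
      ⟨none, (P.length : Int), [], csMkD 0 0 0 0 0 0, csMkD 0 0 0 0 0 0⟩ := by
  rw [csPay]; norm_num; rfl

-- the flush A performs at the next operator is exactly B's non-last step
set_option maxHeartbeats 2000000 in
theorem flush_step (op op2 : Char) (pl : List Char) (c b1 b2 b3 b4 b5 b6 : Int)
    (W : PySem.Dict String Int) (hop : op ∈ csOpsA) (hop2 : op2 ∈ csOpsA) :
    csA_step (csPay ⟨some op, c, [], csMkD b1 b2 b3 b4 b5 b6, W⟩ pl) op2 =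
      ⟨some op2, (csB_nonlast (c, csMkD b1 b2 b3 b4 b5 b6) (op, pl)).1, [],
        (csB_nonlast (c, csMkD b1 b2 b3 b4 b5 b6) (op, pl)).2, csBump W (op2, [])⟩ := by
  simp only [csBump]
  simp only [csOpsA, List.mem_cons, List.not_mem_nil, or_false] at hop
  rcases hop with h | h | h | h | h | h <;> subst h
  · rw [show csB_nonlast (c, csMkD b1 b2 b3 b4 b5 b6) ('=', pl) =
        (0, csMkD (b1 + c + (pl.length : Int)) b2 b3 b4 b5 b6) from rfl,
      show csPay ⟨some '=', c, [], csMkD b1 b2 b3 b4 b5 b6, W⟩ pl =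
        ⟨some '=', c + (pl.length : Int), [], csMkD b1 b2 b3 b4 b5 b6, W⟩ from rfl,
      csA_step, if_pos hop2]
    show (⟨some op2, 0, [], csMkD (b1 + (c + (pl.length : Int))) b2 b3 b4 b5 b6,
        W.modify (String.ofList [op2]) 0 (· + 1)⟩ : CsSt) = _
    simp only [CsSt.mk.injEq]
    refine ⟨trivial, trivial, trivial, ?_, trivial⟩
    congr 1
    omega
  · rw [show csB_nonlast (c, csMkD b1 b2 b3 b4 b5 b6) (':', pl) =
        ((PySem.Int.ofChars? (pl.filter PySem.Chars.isdigit)).getD 0,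
          csMkD b1 b2 b3 b4 b5 b6) from rfl,
      show csPay ⟨some ':', c, [], csMkD b1 b2 b3 b4 b5 b6, W⟩ pl =
        ⟨some ':', c, pl.filter PySem.Chars.isdigit, csMkD b1 b2 b3 b4 b5 b6, W⟩ from by
          rw [csPay]; simp,
      csA_step, if_pos hop2]
    rfl
  · rw [show csB_nonlast (c, csMkD b1 b2 b3 b4 b5 b6) ('*', pl) =
        (0, csMkD b1 b2 (b3 + c + 1) b4 b5 b6) from rfl,
      show csPay ⟨some '*', c, [], csMkD b1 b2 b3 b4 b5 b6, W⟩ pl =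
        ⟨some '*', c, [], csMkD b1 b2 b3 b4 b5 b6, W⟩ from rfl,
      csA_step, if_pos hop2]
    show (⟨some op2, 0, [], csMkD b1 b2 (b3 + 1 + c) b4 b5 b6,
        W.modify (String.ofList [op2]) 0 (· + 1)⟩ : CsSt) = _
    simp only [CsSt.mk.injEq]
    refine ⟨trivial, trivial, trivial, ?_, trivial⟩
    congr 1
    omega
  · rw [show csB_nonlast (c, csMkD b1 b2 b3 b4 b5 b6) ('+', pl) =
        (0, csMkD b1 b2 b3 (b4 + c + (pl.length : Int)) b5 b6) from rfl,
      show csPay ⟨some '+', c, [], csMkD b1 b2 b3 b4 b5 b6, W⟩ pl =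
        ⟨some '+', c + (pl.length : Int), [], csMkD b1 b2 b3 b4 b5 b6, W⟩ from rfl,
      csA_step, if_pos hop2]
    show (⟨some op2, 0, [], csMkD b1 b2 b3 (b4 + (c + (pl.length : Int))) b5 b6,
        W.modify (String.ofList [op2]) 0 (· + 1)⟩ : CsSt) = _
    simp only [CsSt.mk.injEq]
    refine ⟨trivial, trivial, trivial, ?_, trivial⟩
    congr 1
    omega
  · rw [show csB_nonlast (c, csMkD b1 b2 b3 b4 b5 b6) ('-', pl) =
        (0, csMkD b1 b2 b3 b4 (b5 + c + (pl.length : Int)) b6) from rfl,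
      show csPay ⟨some '-', c, [], csMkD b1 b2 b3 b4 b5 b6, W⟩ pl =
        ⟨some '-', c + (pl.length : Int), [], csMkD b1 b2 b3 b4 b5 b6, W⟩ from rfl,
      csA_step, if_pos hop2]
    show (⟨some op2, 0, [], csMkD b1 b2 b3 b4 (b5 + (c + (pl.length : Int))) b6,
        W.modify (String.ofList [op2]) 0 (· + 1)⟩ : CsSt) = _
    simp only [CsSt.mk.injEq]
    refine ⟨trivial, trivial, trivial, ?_, trivial⟩
    congr 1
    omega
  · rw [show csB_nonlast (c, csMkD b1 b2 b3 b4 b5 b6) ('~', pl) =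
        ((PySem.Int.ofChars? (pl.filter PySem.Chars.isdigit)).getD 0,
          csMkD b1 b2 b3 b4 b5 b6) from rfl,
      show csPay ⟨some '~', c, [], csMkD b1 b2 b3 b4 b5 b6, W⟩ pl =
        ⟨some '~', c, pl.filter PySem.Chars.isdigit, csMkD b1 b2 b3 b4 b5 b6, W⟩ from by
          rw [csPay]; simp,
      csA_step, if_pos hop2]
    rfl

-- main token-level correspondence: A's machine vs B's carry run and occurrence bumps
set_option maxHeartbeats 2000000 in
theorem csN (ts : List (Char × List Char)) :
    ∀ (op : Char) (pl : List Char) (c : Int)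
      (b1 b2 b3 b4 b5 b6 : Int) (W : PySem.Dict String Int),
      op ∈ csOpsA → (∀ t ∈ ts, t.1 ∈ csOpsA) →
      csFin (ts.foldl csTok (csPay ⟨some op, c, [], csMkD b1 b2 b3 b4 b5 b6, W⟩ pl)) =
          csBRun (c, csMkD b1 b2 b3 b4 b5 b6) (op, pl) ts
        ∧ (ts.foldl csTok (csPay ⟨some op, c, [], csMkD b1 b2 b3 b4 b5 b6, W⟩ pl)).states =
          ts.foldl csBump W := by
  induction ts with
  | nil =>
    intro op pl c b1 b2 b3 b4 b5 b6 W hop _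
    simp only [List.foldl_nil, csBRun]
    simp only [csOpsA, List.mem_cons, List.not_mem_nil, or_false] at hop
    constructor
    · rcases hop with h | h | h | h | h | h <;> subst h
      · show csMkD (b1 + (c + (pl.length : Int))) b2 b3 b4 b5 b6 = _
        rw [show csB_last (c, csMkD b1 b2 b3 b4 b5 b6) ('=', pl) =
            csMkD (b1 + c + (pl.length : Int)) b2 b3 b4 b5 b6 from rfl]
        congr 1
        omega
      · rfl
      · rfl
      · show csMkD b1 b2 b3 (b4 + (c + (pl.length : Int))) b5 b6 = _
        rw [show csB_last (c, csMkD b1 b2 b3 b4 b5 b6) ('+', pl) =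
            csMkD b1 b2 b3 (b4 + c + (pl.length : Int)) b5 b6 from rfl]
        congr 1
        omega
      · show csMkD b1 b2 b3 b4 (b5 + (c + (pl.length : Int))) b6 = _
        rw [show csB_last (c, csMkD b1 b2 b3 b4 b5 b6) ('-', pl) =
            csMkD b1 b2 b3 b4 (b5 + c + (pl.length : Int)) b6 from rfl]
        congr 1
        omega
      · rfl
    · rcases hop with h | h | h | h | h | h <;> subst h <;> rfl
  | cons u rest ih =>
    intro op pl c b1 b2 b3 b4 b5 b6 W hop hts
    rcases u with ⟨uo, upl⟩
    have hu : uo ∈ csOpsA := hts (uo, upl) (by simp)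
    have hrest : ∀ t ∈ rest, t.1 ∈ csOpsA := fun t ht => hts t (by simp [ht])
    simp only [List.foldl_cons, csBRun]
    rw [show csTok (csPay ⟨some op, c, [], csMkD b1 b2 b3 b4 b5 b6, W⟩ pl) (uo, upl) =
        csPay ⟨some uo, (csB_nonlast (c, csMkD b1 b2 b3 b4 b5 b6) (op, pl)).1, [],
          (csB_nonlast (c, csMkD b1 b2 b3 b4 b5 b6) (op, pl)).2, csBump W (uo, [])⟩ upl from by
        rw [csTok, flush_step op uo pl c b1 b2 b3 b4 b5 b6 W hop hu]]
    rcases hB : csB_nonlast (c, csMkD b1 b2 b3 b4 b5 b6) (op, pl) with ⟨c', B'⟩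
    have hB2 : (csB_nonlast (c, csMkD b1 b2 b3 b4 b5 b6) (op, pl)).2 = B' := by rw [hB]
    have hB' : ∃ a1 a2 a3 a4 a5 a6, B' = csMkD a1 a2 a3 a4 a5 a6 := by
      simp only [csOpsA, List.mem_cons, List.not_mem_nil, or_false] at hop
      rcases hop with h | h | h | h | h | h <;> subst h <;> rw [← hB2]
      · exact ⟨b1 + c + (pl.length : Int), b2, b3, b4, b5, b6, rfl⟩
      · exact ⟨b1, b2, b3, b4, b5, b6, rfl⟩
      · exact ⟨b1, b2, b3 + c + 1, b4, b5, b6, rfl⟩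
      · exact ⟨b1, b2, b3, b4 + c + (pl.length : Int), b5, b6, rfl⟩
      · exact ⟨b1, b2, b3, b4, b5 + c + (pl.length : Int), b6, rfl⟩
      · exact ⟨b1, b2, b3, b4, b5, b6, rfl⟩
    obtain ⟨a1, a2, a3, a4, a5, a6, rfl⟩ := hB'
    exact ih uo upl c' a1 a2 a3 a4 a5 a6 (csBump W (uo, upl)) hu hrest

-- B's dropLast/getLast loop equals the recursive run
set_option maxHeartbeats 2000000 in
theorem csBRun_eq (ts : List (Char × List Char)) :
    ∀ (t : Char × List Char) (cb : Int × PySem.Dict String Int),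
      csBRun cb t ts =
        csB_last ((t :: ts).dropLast.foldl csB_nonlast cb)
          ((t :: ts).getLast (by simp)) := by
  induction ts with
  | nil => intro t cb; rfl
  | cons u rest ih =>
    intro t cb
    rw [csBRun, ih u (csB_nonlast cb t)]
    simp [List.getLast_cons]

-- the occurrence-bump loop is per-operator counting
set_option maxHeartbeats 2000000 in
theorem csS (ts : List (Char × List Char)) :
    ∀ (w1 w2 w3 w4 w5 w6 : Int), (∀ t ∈ ts, t.1 ∈ csOpsA) →
      ts.foldl csBump (csMkD w1 w2 w3 w4 w5 w6) =
        csMkD (w1 + (ts.countP fun t => t.1 == '=' : Int))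
              (w2 + (ts.countP fun t => t.1 == ':' : Int))
              (w3 + (ts.countP fun t => t.1 == '*' : Int))
              (w4 + (ts.countP fun t => t.1 == '+' : Int))
              (w5 + (ts.countP fun t => t.1 == '-' : Int))
              (w6 + (ts.countP fun t => t.1 == '~' : Int)) := by
  induction ts with
  | nil => intro w1 w2 w3 w4 w5 w6 _; simp
  | cons u rest ih =>
    intro w1 w2 w3 w4 w5 w6 h
    rcases u with ⟨uo, upl⟩
    have hu : uo ∈ csOpsA := h (uo, upl) (by simp)
    have hrest : ∀ t ∈ rest, t.1 ∈ csOpsA := fun t ht => h t (by simp [ht])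
    simp only [csOpsA, List.mem_cons, List.not_mem_nil, or_false] at hu
    simp only [List.foldl_cons, List.countP_cons]
    rcases hu with hh | hh | hh | hh | hh | hh <;> subst hh
    · rw [show csBump (csMkD w1 w2 w3 w4 w5 w6) ('=', upl) =
          csMkD (w1 + 1) w2 w3 w4 w5 w6 from rfl, ih _ _ _ _ _ _ hrest]
      simp only [csMkD]
      congr 1
      simp
      omega
    · rw [show csBump (csMkD w1 w2 w3 w4 w5 w6) (':', upl) =
          csMkD w1 (w2 + 1) w3 w4 w5 w6 from rfl, ih _ _ _ _ _ _ hrest]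
      simp only [csMkD]
      congr 1
      simp
      omega
    · rw [show csBump (csMkD w1 w2 w3 w4 w5 w6) ('*', upl) =
          csMkD w1 w2 (w3 + 1) w4 w5 w6 from rfl, ih _ _ _ _ _ _ hrest]
      simp only [csMkD]
      congr 1
      simp
      omega
    · rw [show csBump (csMkD w1 w2 w3 w4 w5 w6) ('+', upl) =
          csMkD w1 w2 w3 (w4 + 1) w5 w6 from rfl, ih _ _ _ _ _ _ hrest]
      simp only [csMkD]
      congr 1
      simp
      omega
    · rw [show csBump (csMkD w1 w2 w3 w4 w5 w6) ('-', upl) =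
          csMkD w1 w2 w3 w4 (w5 + 1) w6 from rfl, ih _ _ _ _ _ _ hrest]
      simp only [csMkD]
      congr 1
      simp
      omega
    · rw [show csBump (csMkD w1 w2 w3 w4 w5 w6) ('~', upl) =
          csMkD w1 w2 w3 w4 w5 (w6 + 1) from rfl, ih _ _ _ _ _ _ hrest]
      simp only [csMkD]
      congr 1
      simp
      omega

-- ===== VERDICT (by name: the statement is the Claim_ definition above) =====
set_option maxHeartbeats 2000000 in
theorem cs_parser_spec : Claim_equal_cs_parser := by
  intro string hdom hpre
  unfold Spec_cs_parser
  have hall : ∀ c ∈ string.toList, pvDomChar c = true := by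
    intro c hc
    exact List.all_eq_true.mp hdom c hc
  obtain ⟨⟨p, hp, hpop⟩, _⟩ := hpre
  have hne : (csToks string.toList).2 ≠ [] := by
    refine csToks_ne_nil string.toList (string.toList.getD p ' ') ?_ hpop
    rw [List.getD_eq_getElem _ _ hp]
    exact List.getElem_mem _
  -- canonical forms of the two ports, by definitional unfolding
  have hA : cs_parser string =
      [("bases", (csFin (string.toList.foldl csA_step ⟨none, 0, [], csA_init, csA_init⟩)).items),
       ("states", (string.toList.foldl csA_step ⟨none, 0, [], csA_init, csA_init⟩).states.items)] := rfl
  rw [hA, cs_parser_alt]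
  rw [tok_eq]
  simp only [List.reverse_reverse, List.length_reverse]
  rw [main_fold string.toList _ hall, pre0]
  rcases hT : (csToks string.toList).2 with _ | ⟨t0, rest⟩
  · exact absurd hT hne
  have hops := csToks_ops string.toList
  rw [hT] at hops
  have ht0 : t0.1 ∈ csOpsA := hops t0 (by simp)
  have hrest : ∀ t ∈ rest, t.1 ∈ csOpsA := fun t ht => hops t (by simp [ht])
  rcases t0 with ⟨o0, p0⟩
  rw [List.foldl_cons, show csTok ⟨none, ((csToks string.toList).1.length : Int), [],
      csMkD 0 0 0 0 0 0, csMkD 0 0 0 0 0 0⟩ (o0, p0) =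
      csPay ⟨some o0, ((csToks string.toList).1.length : Int), [], csMkD 0 0 0 0 0 0,
        csBump (csMkD 0 0 0 0 0 0) (o0, p0)⟩ p0 from by
      rw [csTok, start_step _ _ _ _ _ ht0]
      rfl]
  have hN := csN rest o0 p0 ((csToks string.toList).1.length : Int)
    0 0 0 0 0 0 (csBump (csMkD 0 0 0 0 0 0) (o0, p0)) ht0 hrest
  rw [hN.1, hN.2, csBRun_eq,
    show rest.foldl csBump (csBump (csMkD 0 0 0 0 0 0) (o0, p0)) =
      ((o0, p0) :: rest).foldl csBump (csMkD 0 0 0 0 0 0) from rfl,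
    csS ((o0, p0) :: rest) 0 0 0 0 0 0 hops]
  rw [List.getLast?_eq_some_getLast]
  congr 2
  simp [csMkD, csOpsB]
  simp
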